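-- pv_equiv track=rewrite | github.com/tmu-nlp/UniTP | data/cross/__init__.py | targets
-- ===== SOURCE A (Python) =====
-- def targets(right_layer, joint_layer):
--     targets = [1 for _ in right_layer]
--     tar_len = len(targets)
--     for r0id, (r0, r1, jc) in enumerate(zip(right_layer, right_layer[1:], joint_layer)):
--         if r0 and not r1:
--             if not jc:
--                 targets[r0id] += 1
--                 targets[r0id + 1] -= 2
--                 if r0id + 2 < tar_len:
--                     targets[r0id + 2] += 1
--     return targets
-- ===== SOURCE B (Python) =====
-- def targets(right_layer, joint_layer):
--     n = len(right_layer)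
--     m = min(n - 1, len(joint_layer))
--
--     def cond(j):
--         return 0 <= j < m and right_layer[j] and not right_layer[j + 1] and not joint_layer[j]
--
--     return [1 + (1 if cond(i) else 0) - (2 if cond(i - 1) else 0) + (1 if cond(i - 2) else 0)
--             for i in range(n)]
-- ===== Notes on version B (the rewrite author's own statement) =====
-- stated objective: alternative
-- what changed: Replaces A's scatter loop that mutates up to three forward neighbours per step with a direct gather: each output position is computed in one pass from the trigger condition at indices i, i-1, i-2.
import Mathlib
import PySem

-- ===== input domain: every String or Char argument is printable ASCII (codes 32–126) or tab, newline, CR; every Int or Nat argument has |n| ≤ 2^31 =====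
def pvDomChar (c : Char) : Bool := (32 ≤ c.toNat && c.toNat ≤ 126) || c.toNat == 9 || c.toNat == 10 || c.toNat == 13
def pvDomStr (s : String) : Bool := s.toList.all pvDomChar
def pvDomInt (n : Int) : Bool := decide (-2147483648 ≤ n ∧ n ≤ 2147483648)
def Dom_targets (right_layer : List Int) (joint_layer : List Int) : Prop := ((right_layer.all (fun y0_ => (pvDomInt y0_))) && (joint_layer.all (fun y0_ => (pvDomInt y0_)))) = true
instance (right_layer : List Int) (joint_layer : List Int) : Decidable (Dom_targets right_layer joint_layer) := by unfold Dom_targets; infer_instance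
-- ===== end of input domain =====

-- B computes every output position directly from the trigger condition (gather) instead of
-- A's in-place scatter of increments to forward neighbours; same O(n) cost, different decomposition.

-- ===== PORT A =====
-- A's loop body: state is (targets list, r0id); tarLen is the fixed length computed before the loop.
def stepA (tarLen : Nat) (st : List Int × Nat) (p : (Int × Int) × Int) : List Int × Nat :=
  let t := st.1
  let r0id := st.2
  let t :=
    if p.1.1 ≠ 0 ∧ p.1.2 = 0 then
      if p.2 = 0 then
        let t := t.set r0id (t.getD r0id 0 + 1)
        let t := t.set (r0id + 1) (t.getD (r0id + 1) 0 - 2)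
        if r0id + 2 < tarLen then t.set (r0id + 2) (t.getD (r0id + 2) 0 + 1) else t
      else t
    else t
  (t, r0id + 1)

def targets (right_layer : List Int) (joint_layer : List Int) : List Int :=
  let t0 : List Int := right_layer.map (fun _ => (1 : Int))
  let tarLen := t0.length
  let trips := (right_layer.zip (right_layer.drop 1)).zip joint_layer
  (trips.foldl (stepA tarLen) (t0, 0)).1

-- ===== PORT B =====
-- B's helper cond(j): the trigger fires at j (j in range, right[j] truthy, right[j+1] and joint[j] falsy).
def pvCond (right_layer : List Int) (joint_layer : List Int) (k : Nat) : Bool :=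
  decide (k < min (right_layer.length - 1) joint_layer.length) &&
  decide (right_layer.getD k 0 ≠ 0) &&
  decide (right_layer.getD (k + 1) 0 = 0) &&
  decide (joint_layer.getD k 0 = 0)

def targets_alt (right_layer : List Int) (joint_layer : List Int) : List Int :=
  (List.range right_layer.length).map (fun i =>
    1 + (if pvCond right_layer joint_layer i then (1 : Int) else 0)
      - (if 1 ≤ i ∧ pvCond right_layer joint_layer (i - 1) then (2 : Int) else 0)
      + (if 2 ≤ i ∧ pvCond right_layer joint_layer (i - 2) then (1 : Int) else 0))

-- ===== PRECONDITION & SPEC =====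
def Spec_targets (right_layer : List Int) (joint_layer : List Int) (out : List Int) : Prop :=
  out = targets_alt right_layer joint_layer
instance (right_layer : List Int) (joint_layer : List Int) (out : List Int) :
    Decidable (Spec_targets right_layer joint_layer out) := by unfold Spec_targets; infer_instance

-- ===== CLAIM =====
def Claim_equal_targets : Prop := ∀ (right_layer : List Int) (joint_layer : List Int),
  Dom_targets right_layer joint_layer → Spec_targets right_layer joint_layer (targets right_layer joint_layer)

-- ===== LEMMAS AND PROOFS =====

-- contributions to position i from all still-unprocessed steps k ≥ s
def pvG (r j : List Int) (s i : Nat) : Int :=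
  (if s ≤ i ∧ pvCond r j i then (1 : Int) else 0)
  - (if 1 ≤ i ∧ s + 1 ≤ i ∧ pvCond r j (i - 1) then (2 : Int) else 0)
  + (if 2 ≤ i ∧ s + 2 ≤ i ∧ pvCond r j (i - 2) then (1 : Int) else 0)

theorem pv_getD_set (l : List Int) (m i : Nat) (a : Int) :
    (l.set m a).getD i 0 = if m = i ∧ i < l.length then a else l.getD i 0 := by
  simp only [List.getD_eq_getElem?_getD, List.getElem?_set]
  by_cases h : m = i
  · subst h
    by_cases h2 : m < l.length
    · simp [h2]
    · rw [List.getElem?_eq_none (by omega)]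
      simp [h2]
  · simp [h]

theorem pv_main (r j : List Int) (ts : List ((Int × Int) × Int)) :
    ∀ (s : Nat) (l : List Int),
      ts = ((r.zip (r.drop 1)).zip j).drop s → l.length = r.length →
      ((ts.foldl (stepA r.length) (l, s)).1.length = r.length ∧
       ∀ i, i < r.length →
         (ts.foldl (stepA r.length) (l, s)).1.getD i 0 = l.getD i 0 + pvG r j s i) := by
  induction ts with
  | nil =>
    intro s l hdrop hlen
    have hm : ((r.zip (r.drop 1)).zip j).length ≤ s := by
      by_contra h
      push_neg at h
      have := List.drop_eq_nil_iff.mp hdrop.symm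
      omega
    simp only [List.length_zip, List.length_drop] at hm
    refine ⟨by simpa using hlen, ?_⟩
    intro i _
    have hcnd : ∀ k, pvCond r j k = true → k < min (r.length - 1) j.length := by
      intro k hk
      simp only [pvCond, Bool.and_eq_true, decide_eq_true_eq] at hk
      exact hk.1.1.1
    simp only [List.foldl_nil, pvG]
    rw [if_neg (by rintro ⟨hs, hcond⟩; have := hcnd i hcond; omega),
        if_neg (by rintro ⟨_, hs, hcond⟩; have := hcnd (i - 1) hcond; omega),
        if_neg (by rintro ⟨_, hs, hcond⟩; have := hcnd (i - 2) hcond; omega)]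
    ring
  | cons t ts ih =>
    intro s l hdrop hlen
    set trips := (r.zip (r.drop 1)).zip j with htrips
    have hslt : s < trips.length := by
      by_contra h
      push_neg at h
      rw [List.drop_eq_nil_iff.mpr h] at hdrop
      exact absurd hdrop (by simp)
    have hcons : trips.drop s = trips[s] :: trips.drop (s + 1) :=
      List.drop_eq_getElem_cons hslt
    rw [hcons] at hdrop
    have ht : t = trips[s] := by injection hdrop
    have hts : ts = trips.drop (s + 1) := by injection hdrop
    have hmlen : trips.length = min (r.length - 1) j.length := by
      simp [htrips, List.length_zip, List.length_drop]
    have hsm : s < min (r.length - 1) j.length := by omega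
    have hsr : s < r.length := by omega
    have hs1r : s + 1 < r.length := by omega
    have hsj : s < j.length := by omega
    have ht1 : t.1.1 = r.getD s 0 := by
      subst ht
      simp [htrips, List.getElem_zip, List.getD_eq_getElem?_getD, List.getElem?_eq_getElem hsr]
    have ht2 : t.1.2 = r.getD (s + 1) 0 := by
      subst ht
      simp [htrips, List.getElem_zip, List.getD_eq_getElem?_getD,
        List.getElem?_eq_getElem hs1r, List.getElem_drop]
    have ht3 : t.2 = j.getD s 0 := by
      subst ht
      simp [htrips, List.getElem_zip, List.getD_eq_getElem?_getD, List.getElem?_eq_getElem hsj]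
    -- the state after one step
    have hstep : stepA r.length (l, s) t =
        ((if pvCond r j s then
            let l1 := l.set s (l.getD s 0 + 1)
            let l2 := l1.set (s + 1) (l1.getD (s + 1) 0 - 2)
            if s + 2 < r.length then l2.set (s + 2) (l2.getD (s + 2) 0 + 1) else l2
          else l), s + 1) := by
      simp only [stepA, pvCond, hsm, decide_true, Bool.true_and, ht1, ht2, ht3,
        Bool.and_eq_true, decide_eq_true_eq]
      split_ifs <;> first | rfl | tauto
    set l' := (stepA r.length (l, s) t).1 with hl'
    have hl'len : l'.length = r.length := by
      rw [hl', hstep]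
      dsimp only
      split_ifs <;> simp [hlen]
    have hl'getD : ∀ i, l'.getD i 0 = l.getD i 0 +
        (if pvCond r j s then
          (if i = s then (1 : Int) else 0) - (if i = s + 1 then 2 else 0)
            + (if i = s + 2 ∧ i < r.length then 1 else 0)
         else 0) := by
      intro i
      rw [hl', hstep]
      dsimp only
      by_cases hc : pvCond r j s
      · rw [if_pos hc, if_pos hc]
        have rs1 : (l.set s (l.getD s 0 + 1)).getD (s + 1) 0 = l.getD (s + 1) 0 := by
          rw [pv_getD_set, if_neg (by rintro ⟨h, -⟩; omega)]
        by_cases hsn : s + 2 < r.length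
        · rw [if_pos hsn]
          have rs2 : ((l.set s (l.getD s 0 + 1)).set (s + 1)
              ((l.set s (l.getD s 0 + 1)).getD (s + 1) 0 - 2)).getD (s + 2) 0
              = l.getD (s + 2) 0 := by
            rw [pv_getD_set]
            rw [if_neg (by rintro ⟨h, -⟩; omega), pv_getD_set,
                if_neg (by rintro ⟨h, -⟩; omega)]
          rw [rs2, rs1]
          by_cases h1 : i = s
          · subst h1
            rw [pv_getD_set, if_neg (by rintro ⟨h, -⟩; omega),
                pv_getD_set, if_neg (by rintro ⟨h, -⟩; omega),
                pv_getD_set, if_pos ⟨rfl, by omega⟩,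
                if_pos rfl, if_neg (by omega), if_neg (by rintro ⟨h, -⟩; omega)]
            ring
          · by_cases h2 : i = s + 1
            · subst h2
              rw [pv_getD_set, if_neg (by rintro ⟨h, -⟩; omega),
                  pv_getD_set, if_pos ⟨rfl, by simp; omega⟩,
                  if_neg h1, if_pos rfl, if_neg (by rintro ⟨h, -⟩; omega)]
              ring
            · by_cases h3 : i = s + 2
              · subst h3
                rw [pv_getD_set, if_pos ⟨rfl, by simp; omega⟩,
                    if_neg h1, if_neg h2, if_pos ⟨rfl, by omega⟩]
                ring
              · rw [pv_getD_set, if_neg (by rintro ⟨h, -⟩; omega),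
                    pv_getD_set, if_neg (by rintro ⟨h, -⟩; omega),
                    pv_getD_set, if_neg (by rintro ⟨h, -⟩; omega),
                    if_neg h1, if_neg h2, if_neg (by rintro ⟨h, -⟩; omega)]
                ring
        · rw [if_neg hsn, rs1]
          by_cases h1 : i = s
          · subst h1
            rw [pv_getD_set, if_neg (by rintro ⟨h, -⟩; omega),
                pv_getD_set, if_pos ⟨rfl, by omega⟩,
                if_pos rfl, if_neg (by omega), if_neg (by rintro ⟨h, -⟩; omega)]
            ring
          · by_cases h2 : i = s + 1
            · subst h2
              rw [pv_getD_set, if_pos ⟨rfl, by simp; omega⟩,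
                  if_neg h1, if_pos rfl, if_neg (by rintro ⟨h, -⟩; omega)]
              ring
            · rw [pv_getD_set, if_neg (by rintro ⟨h, -⟩; omega),
                  pv_getD_set, if_neg (by rintro ⟨h, -⟩; omega),
                  if_neg h1, if_neg h2, if_neg (by rintro ⟨h, h'⟩; omega)]
              ring
      · rw [if_neg hc, if_neg hc]
        ring
    have hpair : stepA r.length (l, s) t = (l', s + 1) := by
      rw [hl', hstep]
    have hfold : (t :: ts).foldl (stepA r.length) (l, s)
        = ts.foldl (stepA r.length) (l', s + 1) := by
      simp only [List.foldl_cons, hpair]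
    obtain ⟨ihlen, ihget⟩ := ih (s + 1) l' hts hl'len
    refine ⟨by rw [hfold]; exact ihlen, ?_⟩
    intro i hi
    rw [hfold, ihget i hi, hl'getD i]
    -- arithmetic: per-step delta + remaining(s+1) = remaining(s)
    simp only [pvG]
    by_cases hc : pvCond r j s
    · rw [if_pos hc]
      by_cases h1 : i = s
      · have f1 : s ≤ i ∧ pvCond r j i = true := ⟨by omega, by rw [h1]; exact hc⟩
        have f2 : ¬(s + 1 ≤ i ∧ pvCond r j i = true) := by rintro ⟨h, -⟩; omega
        have f3 : ¬(1 ≤ i ∧ s + 1 ≤ i ∧ pvCond r j (i - 1) = true) := by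
          rintro ⟨-, h, -⟩; omega
        have f4 : ¬(1 ≤ i ∧ s + 1 + 1 ≤ i ∧ pvCond r j (i - 1) = true) := by
          rintro ⟨-, h, -⟩; omega
        have f5 : ¬(2 ≤ i ∧ s + 2 ≤ i ∧ pvCond r j (i - 2) = true) := by
          rintro ⟨-, h, -⟩; omega
        have f6 : ¬(2 ≤ i ∧ s + 1 + 2 ≤ i ∧ pvCond r j (i - 2) = true) := by
          rintro ⟨-, h, -⟩; omega
        have d2 : ¬(i = s + 1) := by omega
        have d3 : ¬(i = s + 2 ∧ i < r.length) := by rintro ⟨h, -⟩; omega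
        rw [if_pos h1, if_neg d2, if_neg d3, if_neg f2, if_neg f4, if_neg f6,
            if_pos f1, if_neg f3, if_neg f5]
        ring
      · by_cases h2 : i = s + 1
        · have e1 : i - 1 = s := by omega
          have d3 : ¬(i = s + 2 ∧ i < r.length) := by rintro ⟨h, -⟩; omega
          have f3 : 1 ≤ i ∧ s + 1 ≤ i ∧ pvCond r j (i - 1) = true :=
            ⟨by omega, by omega, by rw [e1]; exact hc⟩
          have f4 : ¬(1 ≤ i ∧ s + 1 + 1 ≤ i ∧ pvCond r j (i - 1) = true) := by
            rintro ⟨-, h, -⟩; omega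
          have f5 : ¬(2 ≤ i ∧ s + 2 ≤ i ∧ pvCond r j (i - 2) = true) := by
            rintro ⟨-, h, -⟩; omega
          have f6 : ¬(2 ≤ i ∧ s + 1 + 2 ≤ i ∧ pvCond r j (i - 2) = true) := by
            rintro ⟨-, h, -⟩; omega
          by_cases hci : pvCond r j i = true
          · have f1 : s ≤ i ∧ pvCond r j i = true := ⟨by omega, hci⟩
            have f2 : s + 1 ≤ i ∧ pvCond r j i = true := ⟨by omega, hci⟩
            rw [if_neg h1, if_pos h2, if_neg d3, if_pos f2, if_neg f4, if_neg f6,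
                if_pos f1, if_pos f3, if_neg f5]
            ring
          · have f1 : ¬(s ≤ i ∧ pvCond r j i = true) := by rintro ⟨-, h⟩; exact hci h
            have f2 : ¬(s + 1 ≤ i ∧ pvCond r j i = true) := by rintro ⟨-, h⟩; exact hci h
            rw [if_neg h1, if_pos h2, if_neg d3, if_neg f2, if_neg f4, if_neg f6,
                if_neg f1, if_pos f3, if_neg f5]
            ring
        · by_cases h3 : i = s + 2
          · have e1 : i - 1 = s + 1 := by omega
            have e2 : i - 2 = s := by omega
            have d3 : i = s + 2 ∧ i < r.length := ⟨h3, hi⟩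
            have f5 : 2 ≤ i ∧ s + 2 ≤ i ∧ pvCond r j (i - 2) = true :=
              ⟨by omega, by omega, by rw [e2]; exact hc⟩
            have f6 : ¬(2 ≤ i ∧ s + 1 + 2 ≤ i ∧ pvCond r j (i - 2) = true) := by
              rintro ⟨-, h, -⟩; omega
            by_cases hci : pvCond r j i = true
            · have f1 : s ≤ i ∧ pvCond r j i = true := ⟨by omega, hci⟩
              have f2 : s + 1 ≤ i ∧ pvCond r j i = true := ⟨by omega, hci⟩
              by_cases hc1 : pvCond r j (i - 1) = true
              · have f3 : 1 ≤ i ∧ s + 1 ≤ i ∧ pvCond r j (i - 1) = true :=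
                  ⟨by omega, by omega, hc1⟩
                have f4 : 1 ≤ i ∧ s + 1 + 1 ≤ i ∧ pvCond r j (i - 1) = true :=
                  ⟨by omega, by omega, hc1⟩
                rw [if_neg h1, if_neg h2, if_pos d3, if_pos f2, if_pos f4, if_neg f6,
                    if_pos f1, if_pos f3, if_pos f5]
                ring
              · have f3 : ¬(1 ≤ i ∧ s + 1 ≤ i ∧ pvCond r j (i - 1) = true) := by
                  rintro ⟨-, -, h⟩; exact hc1 h
                have f4 : ¬(1 ≤ i ∧ s + 1 + 1 ≤ i ∧ pvCond r j (i - 1) = true) := by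
                  rintro ⟨-, -, h⟩; exact hc1 h
                rw [if_neg h1, if_neg h2, if_pos d3, if_pos f2, if_neg f4, if_neg f6,
                    if_pos f1, if_neg f3, if_pos f5]
                ring
            · have f1 : ¬(s ≤ i ∧ pvCond r j i = true) := by rintro ⟨-, h⟩; exact hci h
              have f2 : ¬(s + 1 ≤ i ∧ pvCond r j i = true) := by rintro ⟨-, h⟩; exact hci h
              by_cases hc1 : pvCond r j (i - 1) = true
              · have f3 : 1 ≤ i ∧ s + 1 ≤ i ∧ pvCond r j (i - 1) = true :=
                  ⟨by omega, by omega, hc1⟩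
                have f4 : 1 ≤ i ∧ s + 1 + 1 ≤ i ∧ pvCond r j (i - 1) = true :=
                  ⟨by omega, by omega, hc1⟩
                rw [if_neg h1, if_neg h2, if_pos d3, if_neg f2, if_pos f4, if_neg f6,
                    if_neg f1, if_pos f3, if_pos f5]
                ring
              · have f3 : ¬(1 ≤ i ∧ s + 1 ≤ i ∧ pvCond r j (i - 1) = true) := by
                  rintro ⟨-, -, h⟩; exact hc1 h
                have f4 : ¬(1 ≤ i ∧ s + 1 + 1 ≤ i ∧ pvCond r j (i - 1) = true) := by
                  rintro ⟨-, -, h⟩; exact hc1 h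
                rw [if_neg h1, if_neg h2, if_pos d3, if_neg f2, if_neg f4, if_neg f6,
                    if_neg f1, if_neg f3, if_pos f5]
                ring
          · have d3 : ¬(i = s + 2 ∧ i < r.length) := by rintro ⟨h, -⟩; omega
            have e1 : (s ≤ i ∧ pvCond r j i = true) ↔ (s + 1 ≤ i ∧ pvCond r j i = true) := by
              constructor
              · rintro ⟨hle, hc2⟩; exact ⟨by omega, hc2⟩
              · rintro ⟨hle, hc2⟩; exact ⟨by omega, hc2⟩
            have e2 : (1 ≤ i ∧ s + 1 ≤ i ∧ pvCond r j (i - 1) = true) ↔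
                (1 ≤ i ∧ s + 1 + 1 ≤ i ∧ pvCond r j (i - 1) = true) := by
              constructor
              · rintro ⟨ha, hb, hc2⟩; exact ⟨ha, by omega, hc2⟩
              · rintro ⟨ha, hb, hc2⟩; exact ⟨ha, by omega, hc2⟩
            have e3 : (2 ≤ i ∧ s + 2 ≤ i ∧ pvCond r j (i - 2) = true) ↔
                (2 ≤ i ∧ s + 1 + 2 ≤ i ∧ pvCond r j (i - 2) = true) := by
              constructor
              · rintro ⟨ha, hb, hc2⟩; exact ⟨ha, by omega, hc2⟩
              · rintro ⟨ha, hb, hc2⟩; exact ⟨ha, by omega, hc2⟩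
            rw [if_neg h1, if_neg h2, if_neg d3,
                if_congr e1.symm rfl rfl, if_congr e2.symm rfl rfl, if_congr e3.symm rfl rfl]
            ring
    · rw [if_neg hc]
      have e1 : (s ≤ i ∧ pvCond r j i = true) ↔ (s + 1 ≤ i ∧ pvCond r j i = true) := by
        constructor
        · rintro ⟨hle, hc2⟩
          rcases Nat.lt_or_ge s i with h | h
          · exact ⟨by omega, hc2⟩
          · have he : i = s := by omega
            exact absurd (he ▸ hc2) hc
        · rintro ⟨hle, hc2⟩; exact ⟨by omega, hc2⟩
      have e2 : (1 ≤ i ∧ s + 1 ≤ i ∧ pvCond r j (i - 1) = true) ↔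
          (1 ≤ i ∧ s + 1 + 1 ≤ i ∧ pvCond r j (i - 1) = true) := by
        constructor
        · rintro ⟨ha, hb, hc2⟩
          rcases Nat.lt_or_ge (s + 1) i with h | h
          · exact ⟨ha, by omega, hc2⟩
          · have he : i - 1 = s := by omega
            exact absurd (he ▸ hc2) hc
        · rintro ⟨ha, hb, hc2⟩; exact ⟨ha, by omega, hc2⟩
      have e3 : (2 ≤ i ∧ s + 2 ≤ i ∧ pvCond r j (i - 2) = true) ↔
          (2 ≤ i ∧ s + 1 + 2 ≤ i ∧ pvCond r j (i - 2) = true) := by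
        constructor
        · rintro ⟨ha, hb, hc2⟩
          rcases Nat.lt_or_ge (s + 2) i with h | h
          · exact ⟨ha, by omega, hc2⟩
          · have he : i - 2 = s := by omega
            exact absurd (he ▸ hc2) hc
        · rintro ⟨ha, hb, hc2⟩; exact ⟨ha, by omega, hc2⟩
      rw [if_congr e1.symm rfl rfl, if_congr e2.symm rfl rfl, if_congr e3.symm rfl rfl]
      ring

theorem targets_alt_getD (r j : List Int) (i : Nat) (hi : i < r.length) :
    (targets_alt r j).getD i 0 = 1 + pvG r j 0 i := by
  simp only [targets_alt, List.getD_eq_getElem?_getD]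
  rw [List.getElem?_map, List.getElem?_range hi]
  simp only [Option.map_some, Option.getD_some, pvG]
  rw [if_congr (show (pvCond r j i = true) ↔ (0 ≤ i ∧ pvCond r j i = true) from
        ⟨fun h => ⟨Nat.zero_le _, h⟩, fun h => h.2⟩) rfl rfl,
      if_congr (show (1 ≤ i ∧ pvCond r j (i - 1) = true)
          ↔ (1 ≤ i ∧ 0 + 1 ≤ i ∧ pvCond r j (i - 1) = true) from
        ⟨fun h => ⟨h.1, by omega, h.2⟩, fun h => ⟨h.1, h.2.2⟩⟩) rfl rfl,
      if_congr (show (2 ≤ i ∧ pvCond r j (i - 2) = true)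
          ↔ (2 ≤ i ∧ 0 + 2 ≤ i ∧ pvCond r j (i - 2) = true) from
        ⟨fun h => ⟨h.1, by omega, h.2⟩, fun h => ⟨h.1, h.2.2⟩⟩) rfl rfl]
  ring

-- ===== VERDICT =====
theorem targets_spec : Claim_equal_targets := by
  intro r j _
  unfold Spec_targets
  have hinit : (r.map (fun _ => (1 : Int))).length = r.length := by simp
  obtain ⟨hlen, hget⟩ := pv_main r j ((r.zip (r.drop 1)).zip j) 0
    (r.map (fun _ => (1 : Int))) (by simp) hinit
  have haltlen : (targets_alt r j).length = r.length := by simp [targets_alt]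
  have htlen : (targets r j).length = r.length := by
    simpa [targets, List.length_map] using hlen
  apply List.ext_getElem (by omega)
  intro i h1 h2
  have hir : i < r.length := by omega
  have hone : (List.map (fun _ => (1 : Int)) r).getD i 0 = 1 := by
    rw [List.getD_eq_getElem?_getD, List.getElem?_map, List.getElem?_eq_getElem hir]
    simp
  have gA : (targets r j).getD i 0 = 1 + pvG r j 0 i := by
    have h := hget i hir
    simp only [targets, List.length_map]
    rw [h, hone]
  have gB := targets_alt_getD r j i hir
  have eA : (targets r j)[i] = (targets r j).getD i 0 := by
    rw [List.getD_eq_getElem?_getD, List.getElem?_eq_getElem h1]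
    simp
  have eB : (targets_alt r j)[i] = (targets_alt r j).getD i 0 := by
    rw [List.getD_eq_getElem?_getD, List.getElem?_eq_getElem h2]
    simp
  rw [eA, eB, gA, gB]
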